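-- pv_equiv track=rewrite | github.com/01090841589/solved_problem | 20190715_0719/20190715_D2어디에단어가들어갈수있을까.py | cal_stat
-- ===== SOURCE A (Python) =====
-- K = 3
--
-- def cal_stat(mat) :
--     length = 0
--     answer = 0
--     for i in range(len(mat)):
--         for j in range(len(mat)):
--             if mat[i][j] == 1 :
--                 length += 1
--                 if j < len(mat)-1 :
--                     if mat[i][j+1] == 1 :
--                         continue
--                     else :
--                         if length == K :
--                             answer += 1
--                         length = 0
--             if length == K:
--                 answer += 1
--         length = 0
--     for j in range(len(mat)):
--         for i in range(len(mat)):
--             if mat[i][j] == 1 :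
--                 length += 1
--                 if i < len(mat)-1 :
--                     if mat[i+1][j] == 1 :
--                         continue
--                     else :
--                         if length == K :
--                             answer += 1
--                         length = 0
--             if length == K:
--                 answer += 1
--         length = 0
--     return answer
-- ===== SOURCE B (Python) =====
-- K = 3
--
-- def cal_stat(mat):
--     n = len(mat)
--
--     def line(get):
--         # count maximal runs of 1s of length exactly K via a stateless window test
--         c = 0
--         for s in range(n - K + 1):
--             if (all(get(s + t) == 1 for t in range(K))
--                     and (s == 0 or get(s - 1) != 1)
--                     and (s + K == n or get(s + K) != 1)):
--                 c += 1
--         return c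
--
--     total = 0
--     for i in range(n):
--         total += line(lambda j: mat[i][j])
--     for j in range(n):
--         total += line(lambda i: mat[i][j])
--     return total
-- ===== Notes on version B (the rewrite author's own statement) =====
-- stated objective: alternative
-- what changed: A's stateful run-length accumulator with lookahead and `continue` control flow is replaced by a stateless per-position window test (cells s..s+K-1 equal 1, bounded left and right by a non-1 cell or the line's edge), applied through one shared helper to each row and each column.
import Mathlib
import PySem

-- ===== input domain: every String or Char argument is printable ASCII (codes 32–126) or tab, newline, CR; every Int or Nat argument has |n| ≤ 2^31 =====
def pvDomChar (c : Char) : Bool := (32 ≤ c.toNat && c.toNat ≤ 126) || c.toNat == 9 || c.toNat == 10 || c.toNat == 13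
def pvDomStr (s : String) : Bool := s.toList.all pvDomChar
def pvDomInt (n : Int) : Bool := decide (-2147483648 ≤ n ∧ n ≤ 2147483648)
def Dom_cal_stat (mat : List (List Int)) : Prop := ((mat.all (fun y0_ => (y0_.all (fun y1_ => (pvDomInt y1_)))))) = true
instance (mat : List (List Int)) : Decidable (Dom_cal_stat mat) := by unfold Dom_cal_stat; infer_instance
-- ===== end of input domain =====

-- B replaces A's stateful run-length scan (with lookahead and `continue`) by a stateless
-- per-position window test applied through one helper to rows and columns; same results, no speed claim.

-- ===== PORT A =====
-- shared cell access mat[i][j]; all indices used are ≥ 0, and Pre_ keeps them in range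
-- (the `.getD` defaults are never reached inside Pre_)
def pvGetCell (mat : List (List Int)) (i j : Int) : Int :=
  (PySem.List.pyGet? ((PySem.List.pyGet? mat i).getD []) j).getD 0

-- the body of A's inner loop (identical in both passes with the two indices' roles swapped);
-- `get k` is cell k of the current line, n = len(mat), state = (length, answer), K = 3
def pvStep (get : Int → Int) (n : Int) (st : Int × Int) (j : Int) : Int × Int :=
  let length := st.1
  let answer := st.2
  if get j = 1 then
    let length := length + 1
    if j < n - 1 then
      if get (j + 1) = 1 then (length, answer)  -- continue
      else
        let answer := if length = 3 then answer + 1 else answer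
        let length := (0 : Int)
        (length, if length = 3 then answer + 1 else answer)
    else (length, if length = 3 then answer + 1 else answer)
  else (length, if length = 3 then answer + 1 else answer)

def cal_stat (mat : List (List Int)) : Int :=
  let n : Int := (mat.length : Int)
  let answer1 :=
    (PySem.List.pyRange 0 n 1).foldl
      (fun answer i =>
        ((PySem.List.pyRange 0 n 1).foldl (pvStep (fun j => pvGetCell mat i j) n) (0, answer)).2)
      0
  (PySem.List.pyRange 0 n 1).foldl
    (fun answer j =>
      ((PySem.List.pyRange 0 n 1).foldl (pvStep (fun i => pvGetCell mat i j) n) (0, answer)).2)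
    answer1

-- ===== PORT B =====
-- window test of Source B: cells s..s+2 are 1, bounded by non-1 (or the line's ends)
def pvWin (get : Int → Int) (n s : Int) : Bool :=
  ((PySem.List.pyRange 0 3 1).all (fun t => get (s + t) == 1))
    && (s == 0 || !(get (s - 1) == 1))
    && (s + 3 == n || !(get (s + 3) == 1))

def pvLine (get : Int → Int) (n : Int) : Int :=
  (PySem.List.pyRange 0 (n - 3 + 1) 1).foldl (fun c s => if pvWin get n s then c + 1 else c) 0

def cal_stat_alt (mat : List (List Int)) : Int :=
  let n : Int := (mat.length : Int)
  let total :=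
    (PySem.List.pyRange 0 n 1).foldl (fun t i => t + pvLine (fun j => pvGetCell mat i j) n) 0
  (PySem.List.pyRange 0 n 1).foldl (fun t j => t + pvLine (fun i => pvGetCell mat i j) n) total

-- ===== PRECONDITION & SPEC =====
-- Pre_ excludes exactly the inputs where Python A raises IndexError: some row shorter than len(mat)
def Pre_cal_stat (mat : List (List Int)) : Prop :=
  ∀ row ∈ mat, mat.length ≤ row.length
instance (mat : List (List Int)) : Decidable (Pre_cal_stat mat) := by unfold Pre_cal_stat; infer_instance

def pvWitness_cal_stat : List (List Int) := [[1, 1, 1], [0, 1, 0], [1, 0, 1]]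

def Spec_cal_stat (mat : List (List Int)) (out : Int) : Prop := out = cal_stat_alt mat
instance (mat : List (List Int)) (out : Int) : Decidable (Spec_cal_stat mat out) := by unfold Spec_cal_stat; infer_instance

-- ===== CLAIM (what is proved, stated in full; the proofs are below) =====
def Claim_equal_cal_stat : Prop := ∀ (mat : List (List Int)), Dom_cal_stat mat → Pre_cal_stat mat → Spec_cal_stat mat (cal_stat mat)

-- ===== LEMMAS AND PROOFS =====

-- length of the leading run of 1s
def leadOnes : List Int → Nat
  | [] => 0
  | c :: t => if c = 1 then leadOnes t + 1 else 0

-- number of maximal runs of 1s of length exactly 3 (the common specification of both lines)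
def E : List Int → Int
  | [] => 0
  | c :: t =>
    if c = 1 then (if leadOnes t + 1 = 3 then 1 else 0) + E (t.drop (leadOnes t)) else E t
termination_by l => l.length
decreasing_by
  · simp only [List.length_cons, List.length_drop]; omega
  · simp

-- A's inner loop, rewritten over the list of cells (lookahead = head of the tail)
def aGo : Int → Int → List Int → Int
  | _, ans, [] => ans
  | len, ans, c :: t =>
    if c = 1 then
      match t with
      | d :: _ =>
        if d = 1 then aGo (len + 1) ans t
        else aGo 0 (if len + 1 = 3 then ans + 1 else ans) t
      | [] => if len + 1 = 3 then ans + 1 else ans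
    else aGo len (if len = 3 then ans + 1 else ans) t

-- B's window test at the head of a suffix: the leading run is exactly 3 ones
def isWin (l : List Int) : Bool :=
  decide (leadOnes l = 3)

-- B's count, rewritten over suffixes; b = "the previous cell is 1"
def G : Bool → List Int → Int
  | _, [] => 0
  | b, c :: t => (if !b && isWin (c :: t) then 1 else 0) + G (c == 1) t

@[simp] theorem leadOnes_nil : leadOnes [] = 0 := rfl
@[simp] theorem leadOnes_cons_one (t : List Int) : leadOnes (1 :: t) = leadOnes t + 1 := by
  simp [leadOnes]
theorem leadOnes_cons_ne (c : Int) (t : List Int) (h : c ≠ 1) : leadOnes (c :: t) = 0 := by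
  simp [leadOnes, h]

@[simp] theorem E_nil : E [] = 0 := by rw [E]
theorem E_cons_one (t : List Int) :
    E (1 :: t) = (if leadOnes t + 1 = 3 then 1 else 0) + E (t.drop (leadOnes t)) := by
  rw [E]; simp
theorem E_cons_ne (c : Int) (t : List Int) (h : c ≠ 1) : E (c :: t) = E t := by
  rw [E]; simp [h]

theorem E_expand (t : List Int) :
    (if (leadOnes t : Int) = 3 then 1 else 0) + E (t.drop (leadOnes t)) = E t := by
  cases t with
  | nil => simp
  | cons c t =>
    by_cases hc : c = 1
    · subst hc
      rw [E_cons_one]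
      simp only [leadOnes_cons_one, List.drop_succ_cons]
      have h : (((leadOnes t + 1 : Nat) : Int) = 3) ↔ (leadOnes t + 1 = 3) := by omega
      rw [if_congr h rfl rfl]
    · rw [leadOnes_cons_ne c t hc]
      simp [E_cons_ne c t hc]

theorem E_short (l : List Int) (h : l.length ≤ 2) : E l = 0 := by
  match l, h with
  | [], _ => simp
  | [a], _ =>
    by_cases ha : a = 1
    · subst ha; rw [E_cons_one]; simp
    · rw [E_cons_ne a [] ha]; simp
  | [a, b], _ =>
    by_cases ha : a = 1
    · subst ha
      rw [E_cons_one]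
      by_cases hb : b = 1
      · subst hb; simp
      · simp [leadOnes_cons_ne b [] hb, E_cons_ne b [] hb]
    · rw [E_cons_ne a [b] ha]
      by_cases hb : b = 1
      · subst hb; rw [E_cons_one]; simp
      · rw [E_cons_ne b [] hb]; simp

theorem G_main (l : List Int) (b : Bool) :
    G b l = if b then E (l.drop (leadOnes l)) else E l := by
  induction l generalizing b with
  | nil => cases b <;> simp [G]
  | cons c t ih =>
    by_cases hc : c = 1
    · subst hc
      rw [G, ih]
      cases b with
      | false =>
        have hwin : (isWin (1 :: t) = true) ↔ (leadOnes t + 1 = 3) := by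
          simp [isWin]
        rw [E_cons_one]
        simp only [Bool.not_false, Bool.true_and, leadOnes_cons_one, List.drop_succ_cons,
          if_false, Bool.false_eq_true]
        by_cases h3 : leadOnes t + 1 = 3
        · rw [if_pos (hwin.mpr h3), if_pos h3]; simp
        · rw [if_neg (fun hh => h3 (hwin.mp hh)), if_neg h3]; simp
      | true =>
        simp
    · rw [G, ih]
      have hw : isWin (c :: t) = false := by
        simp [isWin, leadOnes_cons_ne c t hc]
      have hbeq : (c == 1) = false := by simp [hc]
      rw [leadOnes_cons_ne c t hc, E_cons_ne c t hc, hw, hbeq]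
      cases b <;> simp [E_cons_ne c t hc]

theorem G_short (l : List Int) (b : Bool) (h : l.length ≤ 2) : G b l = 0 := by
  rw [G_main]
  have h1 : E (l.drop (leadOnes l)) = 0 := by
    apply E_short
    simp only [List.length_drop]
    omega
  have h2 : E l = 0 := E_short _ h
  cases b <;> simp [h1, h2]

theorem aGo_nil (len ans : Int) : aGo len ans [] = ans := by rw [aGo]

theorem aGo_single_one (len ans : Int) :
    aGo len ans [1] = if len + 1 = 3 then ans + 1 else ans := by
  rw [aGo.eq_def]; simp

theorem aGo_one_one (len ans : Int) (t : List Int) :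
    aGo len ans (1 :: 1 :: t) = aGo (len + 1) ans (1 :: t) := by
  rw [aGo.eq_def]; simp

theorem aGo_one_ne (len ans d : Int) (t : List Int) (hd : d ≠ 1) :
    aGo len ans (1 :: d :: t) = aGo 0 (if len + 1 = 3 then ans + 1 else ans) (d :: t) := by
  rw [aGo.eq_def]; simp [hd]

theorem aGo_cons_ne (len ans c : Int) (t : List Int) (hc : c ≠ 1) :
    aGo len ans (c :: t) = aGo len (if len = 3 then ans + 1 else ans) t := by
  rw [aGo.eq_def]; simp [hc]

theorem aGo_main (l : List Int) (ans len : Int) (h : len = 0 ∨ l.head? = some 1) :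
    aGo len ans l = ans + (if (leadOnes l : Int) + len = 3 then 1 else 0)
      + E (l.drop (leadOnes l)) := by
  induction l generalizing ans len with
  | nil =>
    rcases h with h | h
    · subst h; simp [aGo_nil]
    · simp at h
  | cons c t ih =>
    by_cases hc : c = 1
    · subst hc
      cases t with
      | nil =>
        rw [aGo_single_one]
        simp only [leadOnes_cons_one, leadOnes_nil, List.drop_succ_cons, List.drop_nil, E_nil]
        have h1 : (((0 + 1 : Nat) : Int) + len = 3) ↔ (len + 1 = 3) := by omega
        rw [if_congr h1 rfl rfl]
        split <;> ring
      | cons d t' =>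
        by_cases hd : d = 1
        · subst hd
          rw [aGo_one_one]
          rw [ih ans (len + 1) (Or.inr rfl)]
          simp only [leadOnes_cons_one, List.drop_succ_cons]
          have h1 : (((leadOnes t' + 1 : Nat) : Int) + (len + 1) = 3)
              ↔ (((leadOnes t' + 1 + 1 : Nat) : Int) + len = 3) := by
            push_cast; omega
          rw [if_congr h1 rfl rfl]
        · rw [aGo_one_ne len ans d t' hd]
          rw [ih _ 0 (Or.inl rfl)]
          have hl : leadOnes (d :: t') = 0 := leadOnes_cons_ne d t' hd
          have hl2 : leadOnes ((1 : Int) :: d :: t') = 1 := by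
            rw [leadOnes_cons_one, hl]
          rw [hl, hl2]
          simp only [Nat.cast_zero, Nat.cast_one, zero_add, List.drop_zero, List.drop_succ_cons]
          have h1 : ((1 : Int) + len = 3) ↔ (len + 1 = 3) := by omega
          rw [if_congr h1 rfl rfl]
          split <;> simp <;> ring
    · rw [aGo_cons_ne len ans c t hc]
      rcases h with h | h
      · subst h
        rw [ih _ 0 (Or.inl rfl)]
        rw [leadOnes_cons_ne c t hc]
        simp only [Nat.cast_zero, zero_add, List.drop_zero]
        rw [E_cons_ne c t hc, ← E_expand t]
        norm_num [add_assoc]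
      · simp at h; exact absurd h hc

-- bridge: A's inner index loop equals aGo on the list of cells
theorem bridgeA (k : Nat) (get : Int → Int) (n : Int) :
    ∀ (j : Int) (st : Int × Int), 0 ≤ j → j + k = n →
    ((PySem.List.pyRange j n 1).foldl (pvStep get n) st).2
      = aGo st.1 st.2 ((PySem.List.pyRange j n 1).map get) := by
  induction k with
  | zero =>
    intro j st hj hk
    rw [PySem.List.pyRange_one_eq_nil (by omega)]
    simp [aGo_nil]
  | succ k ih =>
    intro j st hj hk
    rw [PySem.List.pyRange_one_cons (by omega : j < n), List.foldl_cons, List.map_cons,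
        ih (j + 1) (pvStep get n st j) (by omega) (by omega)]
    by_cases hc : get j = 1
    · cases k with
      | zero =>
        rw [PySem.List.pyRange_one_eq_nil (by omega : n ≤ j + 1)]
        rw [List.map_nil, hc, aGo_single_one, aGo_nil]
        have hjn : ¬ j < n - 1 := by omega
        simp [pvStep, hc, hjn]
      | succ k' =>
        rw [PySem.List.pyRange_one_cons (by omega : j + 1 < n), List.map_cons]
        have hjn : j < n - 1 := by omega
        by_cases hd : get (j + 1) = 1
        · rw [hc, hd, aGo_one_one]
          simp [pvStep, hc, hd, hjn]
        · rw [hc, aGo_one_ne _ _ _ _ hd]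
          simp [pvStep, hc, hd, hjn]
    · rw [aGo_cons_ne _ _ _ _ hc]
      simp [pvStep, hc]

-- bridge helper: the window test at s equals isWin of the suffix of cells from s
theorem win_eq (get : Int → Int) (n s : Int) (k : Nat) (hs : 0 ≤ s) (hk : s + k = n)
    (h3 : 3 ≤ k) :
    pvWin get n s
      = (!(decide (0 < s) && (get (s - 1) == 1))
          && isWin ((PySem.List.pyRange s n 1).map get)) := by
  have e0 : PySem.List.pyRange 0 3 1 = [0, 1, 2] := by decide
  rw [PySem.List.pyRange_one_cons (by omega : s < n),
      PySem.List.pyRange_one_cons (by omega : s + 1 < n),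
      PySem.List.pyRange_one_cons (by omega : s + 1 + 1 < n)]
  rw [pvWin, e0]
  simp only [List.all_cons, List.all_nil, List.map_cons, Bool.and_true, add_zero,
    show s + 1 + 1 = s + 2 by ring]
  by_cases h4 : k = 3
  · rw [PySem.List.pyRange_one_eq_nil (by omega : n ≤ s + 2 + 1), List.map_nil]
    have hsn : (s + 3 == n) = true := by simp only [beq_iff_eq]; omega
    rw [hsn]
    by_cases h0 : s = 0
    · subst h0
      norm_num
      by_cases hg0 : get 0 = 1 <;> by_cases hg1 : get 1 = 1 <;> by_cases hg2 : get 2 = 1 <;>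
        (try simp_all [isWin, leadOnes]) <;> (try omega)
    · have hpos : decide (0 < s) = true := by simp only [decide_eq_true_eq]; omega
      have hs0 : (s == 0) = false := by simp only [beq_eq_false_iff_ne, ne_eq]; exact h0
      rw [hs0, hpos]
      by_cases hgp : get (s - 1) = 1 <;> by_cases hg0 : get s = 1 <;>
        by_cases hg1 : get (s + 1) = 1 <;> by_cases hg2 : get (s + 2) = 1 <;>
        (try simp_all [isWin, leadOnes]) <;> (try omega)
  · rw [PySem.List.pyRange_one_cons (by omega : s + 2 + 1 < n), List.map_cons]
    have hsn : (s + 3 == n) = false := by simp only [beq_eq_false_iff_ne, ne_eq]; omega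
    rw [hsn, show s + 2 + 1 = s + 3 by ring]
    by_cases h0 : s = 0
    · subst h0
      norm_num
      by_cases hg0 : get 0 = 1 <;> by_cases hg1 : get 1 = 1 <;> by_cases hg2 : get 2 = 1 <;>
        by_cases hg3 : get 3 = 1 <;>
        (try simp_all [isWin, leadOnes]) <;> (try omega)
    · have hpos : decide (0 < s) = true := by simp only [decide_eq_true_eq]; omega
      have hs0 : (s == 0) = false := by simp only [beq_eq_false_iff_ne, ne_eq]; exact h0
      rw [hs0, hpos]
      by_cases hgp : get (s - 1) = 1 <;> by_cases hg0 : get s = 1 <;>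
        by_cases hg1 : get (s + 1) = 1 <;> by_cases hg2 : get (s + 2) = 1 <;>
        by_cases hg3 : get (s + 3) = 1 <;>
        (try simp_all [isWin, leadOnes]) <;> (try omega)

-- bridge: B's window-count loop equals G on the list of cells
theorem bridgeB (k : Nat) (get : Int → Int) (n : Int) :
    ∀ (s c : Int), 0 ≤ s → s + k = n →
    (PySem.List.pyRange s (n - 3 + 1) 1).foldl (fun c s => if pvWin get n s then c + 1 else c) c
      = c + G (decide (0 < s) && (get (s - 1) == 1)) ((PySem.List.pyRange s n 1).map get) := by
  induction k with
  | zero =>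
    intro s c hs hk
    rw [PySem.List.pyRange_one_eq_nil (by omega), PySem.List.pyRange_one_eq_nil (by omega)]
    simp [G]
  | succ k ih =>
    intro s c hs hk
    by_cases hsmall : k + 1 ≤ 2
    · rw [PySem.List.pyRange_one_eq_nil (by omega : n - 3 + 1 ≤ s)]
      rw [List.foldl_nil, G_short]
      · ring
      · rw [List.length_map, PySem.List.length_pyRange_one]
        omega
    · have hb : (decide (0 < s + 1) && (get (s + 1 - 1) == 1)) = (get s == 1) := by
        have h1 : decide (0 < s + 1) = true := by simp only [decide_eq_true_eq]; omega
        rw [h1, show s + 1 - 1 = s by ring, Bool.true_and]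
      rw [PySem.List.pyRange_one_cons (by omega : s < n - 3 + 1), List.foldl_cons,
          ih (s + 1) _ (by omega) (by omega), hb,
          win_eq get n s (k + 1) hs hk (by omega),
          PySem.List.pyRange_one_cons (by omega : s < n), List.map_cons, G]
      split <;> ring

-- per-line results
theorem lineA (get : Int → Int) (n ans : Int) (hn : 0 ≤ n) :
    ((PySem.List.pyRange 0 n 1).foldl (pvStep get n) (0, ans)).2
      = ans + E ((PySem.List.pyRange 0 n 1).map get) := by
  rw [bridgeA n.toNat get n 0 (0, ans) le_rfl (by omega)]
  rw [aGo_main _ _ _ (Or.inl rfl)]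
  rw [← E_expand ((PySem.List.pyRange 0 n 1).map get)]
  ring_nf

theorem lineB (get : Int → Int) (n : Int) (hn : 0 ≤ n) :
    pvLine get n = E ((PySem.List.pyRange 0 n 1).map get) := by
  rw [pvLine]
  rw [bridgeB n.toNat get n 0 0 le_rfl (by omega)]
  have : (decide ((0 : Int) < 0) && (get (0 - 1) == 1)) = false := by simp
  rw [this, G_main]
  simp

theorem main_eq (mat : List (List Int)) : cal_stat mat = cal_stat_alt mat := by
  have hn : (0 : Int) ≤ (mat.length : Int) := by positivity
  rw [cal_stat, cal_stat_alt]
  have e1 : (fun (answer i : Int) =>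
        ((PySem.List.pyRange 0 (mat.length : Int) 1).foldl
          (pvStep (fun j => pvGetCell mat i j) (mat.length : Int)) (0, answer)).2)
      = fun (t i : Int) => t + pvLine (fun j => pvGetCell mat i j) (mat.length : Int) := by
    funext ans i
    rw [lineA _ _ _ hn, lineB _ _ hn]
  have e2 : (fun (answer j : Int) =>
        ((PySem.List.pyRange 0 (mat.length : Int) 1).foldl
          (pvStep (fun i => pvGetCell mat i j) (mat.length : Int)) (0, answer)).2)
      = fun (t j : Int) => t + pvLine (fun i => pvGetCell mat i j) (mat.length : Int) := by
    funext ans j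
    rw [lineA _ _ _ hn, lineB _ _ hn]
  simp only [e1, e2]

-- ===== VERDICT (by name: the statement is the Claim_ definition above) =====
theorem cal_stat_spec : Claim_equal_cal_stat := by
  intro mat _ _
  unfold Spec_cal_stat
  exact main_eq mat
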